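-- pv_equiv track=rewrite | github.com/KimJinung/problem_solving | Programmers/2/쿼드압축 후 개수 세기.py | is_compress
-- ===== SOURCE A (Python) =====
-- def is_compress(arr: list) -> int:
--     prev_bit = arr[0][0]
--     cnt = 0
--
--     for row in arr:
--         for bit in row:
--             if prev_bit != bit:
--                 return 0
--
--             prev_bit = bit
--             cnt += 1
--
--     return cnt
-- ===== SOURCE B (Python) =====
-- def is_compress(arr: list) -> int:
--     flat = [bit for row in arr for bit in row]
--     if len(set(flat)) > 1:
--         return 0
--     return len(flat)
-- ===== Notes on version B (the rewrite author's own statement) =====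
-- stated objective: simpler
-- what changed: Replaces the nested early-return scan chaining prev_bit equality with flattening the grid once and a distinct-value cardinality check (len(set(flat)) > 1 -> 0, else total count).
import Mathlib
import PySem

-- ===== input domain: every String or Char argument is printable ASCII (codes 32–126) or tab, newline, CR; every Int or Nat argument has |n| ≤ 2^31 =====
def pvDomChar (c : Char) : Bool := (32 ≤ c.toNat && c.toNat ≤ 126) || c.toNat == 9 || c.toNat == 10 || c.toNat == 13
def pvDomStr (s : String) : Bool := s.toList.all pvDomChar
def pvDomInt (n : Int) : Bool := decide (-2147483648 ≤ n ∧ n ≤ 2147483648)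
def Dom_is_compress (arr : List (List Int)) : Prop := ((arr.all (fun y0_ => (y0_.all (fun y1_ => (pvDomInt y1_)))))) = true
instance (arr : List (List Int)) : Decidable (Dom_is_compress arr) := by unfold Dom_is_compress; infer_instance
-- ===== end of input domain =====

-- B replaces A's nested early-return prev_bit scan by a one-pass flatten plus a
-- distinct-value cardinality check; same cost, simpler shape.

-- ===== PORT A =====
-- inner loop: 'for bit in row', threading (prev_bit, cnt); none = the 'return 0' was taken
def aInner : List Int → Int → Int → Option (Int × Int)
  | [], prev, cnt => some (prev, cnt)
  | b :: bs, prev, cnt => if prev ≠ b then none else aInner bs b (cnt + 1)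

-- outer loop: 'for row in arr'
def aRows : List (List Int) → Int → Int → Int
  | [], _, cnt => cnt
  | r :: rs, prev, cnt =>
      match aInner r prev cnt with
      | none => 0
      | some (p, c) => aRows rs p c

def is_compress (arr : List (List Int)) : Int :=
  match PySem.List.pyGet? arr 0 with
  | none => 0      -- IndexError in Python: excluded by Pre_
  | some r0 =>
    match PySem.List.pyGet? r0 0 with
    | none => 0    -- IndexError in Python: excluded by Pre_
    | some prev => aRows arr prev 0

-- ===== PORT B =====
def is_compress_alt (arr : List (List Int)) : Int :=
  let flat := arr.flatMap (fun row => row)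
  if PySem.Set.len (PySem.Set.ofList flat) > 1 then 0 else (flat.length : Int)

-- ===== PRECONDITION & SPEC =====
-- Pre_ excludes exactly the inputs on which A raises IndexError: empty grid or empty first row.
def Pre_is_compress (arr : List (List Int)) : Prop := arr ≠ [] ∧ arr.headI ≠ []
instance (arr : List (List Int)) : Decidable (Pre_is_compress arr) := by unfold Pre_is_compress; infer_instance
def pvWitness_is_compress : List (List Int) := [[1, 1], [1, 1]]

def Spec_is_compress (arr : List (List Int)) (out : Int) : Prop := out = is_compress_alt arr
instance (arr : List (List Int)) (out : Int) : Decidable (Spec_is_compress arr out) := by unfold Spec_is_compress; infer_instance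

-- ===== CLAIM (what is proved, stated in full; the proofs are below) =====
def Claim_equal_is_compress : Prop := ∀ (arr : List (List Int)), Dom_is_compress arr → Pre_is_compress arr → Spec_is_compress arr (is_compress arr)

-- ===== LEMMAS AND PROOFS =====

-- aInner succeeds iff every bit of the row equals prev, and then prev is unchanged and cnt grows by the row length
theorem aInner_eq (r : List Int) (prev cnt : Int) :
    aInner r prev cnt =
      if ∀ b ∈ r, b = prev then some (prev, cnt + r.length) else none := by
  induction r generalizing prev cnt with
  | nil => simp [aInner]
  | cons b bs ih =>
    simp only [aInner]
    by_cases hb : b = prev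
    · subst hb
      rw [if_neg (by simp), ih]
      simp only [List.mem_cons, forall_eq_or_imp, true_and, List.length_cons]
      split_ifs with h
      · simp only [Option.some.injEq, Prod.mk.injEq, true_and]
        push_cast; ring
      · rfl
    · rw [if_pos (by simpa using Ne.symm hb), if_neg (by
        intro h; exact hb (h b (by simp)))]

-- the outer loop: all-equal ⇒ cnt + total number of bits, otherwise 0
theorem aRows_eq (rs : List (List Int)) (prev cnt : Int) :
    aRows rs prev cnt =
      if ∀ r ∈ rs, ∀ b ∈ r, b = prev
      then cnt + ((rs.flatMap (fun row => row)).length : Int) else 0 := by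
  induction rs generalizing cnt with
  | nil => simp [aRows]
  | cons r rs ih =>
    simp only [aRows, aInner_eq]
    by_cases hr : ∀ b ∈ r, b = prev
    · rw [if_pos hr]
      have hred : (match some (prev, cnt + (r.length : Int)) with
          | none => (0 : Int) | some (p, c) => aRows rs p c)
          = aRows rs prev (cnt + (r.length : Int)) := rfl
      rw [hred, ih]
      by_cases hrs : ∀ r' ∈ rs, ∀ b ∈ r', b = prev
      · rw [if_pos hrs, if_pos (by
          intro r' hr'; rcases List.mem_cons.mp hr' with h | h
          · exact h ▸ hr
          · exact hrs r' h)]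
        simp only [List.flatMap_cons, List.length_append]
        push_cast; ring
      · rw [if_neg hrs, if_neg (by
          intro h; exact hrs fun r' h' => h r' (List.mem_cons.mpr (Or.inr h')))]
    · rw [if_neg hr, if_neg (by
        intro h; exact hr (h r (List.mem_cons.mpr (Or.inl rfl))))]

-- a duplicate-free list whose members are all pairwise equal has at most one element, and conversely
theorem nodup_len_le_one {α : Type} (l : List α) (hnd : l.Nodup) :
    l.length ≤ 1 ↔ ∀ x ∈ l, ∀ y ∈ l, x = y := by
  constructor
  · intro h x hx y hy
    cases l with
    | nil => simp at hx
    | cons a t =>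
      cases t with
      | nil =>
        simp only [List.mem_singleton] at hx hy
        rw [hx, hy]
      | cons b t' => simp at h
  · intro h
    cases l with
    | nil => simp
    | cons a t =>
      cases t with
      | nil => simp
      | cons b t' =>
        exfalso
        have hab : a = b := h a (by simp) b (by simp)
        simp [hab] at hnd

theorem set_len_le_one (l : List Int) :
    PySem.Set.len (PySem.Set.ofList l) ≤ 1 ↔ ∀ x ∈ l, ∀ y ∈ l, x = y := by
  have hiff := nodup_len_le_one (PySem.Set.ofList l) (PySem.Set.nodup_ofList l)
  simp only [PySem.Set.len]
  constructor
  · intro h x hx y hy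
    exact (hiff.mp (by exact_mod_cast h)) x ((PySem.Set.mem_ofList l x).mpr hx)
      y ((PySem.Set.mem_ofList l y).mpr hy)
  · intro h
    have := hiff.mpr (fun x hx y hy =>
      h x ((PySem.Set.mem_ofList l x).mp hx) y ((PySem.Set.mem_ofList l y).mp hy))
    exact_mod_cast this

-- ===== VERDICT (by name: the statement is the Claim_ definition above) =====
theorem is_compress_spec : Claim_equal_is_compress := by
  intro arr _ hpre
  obtain ⟨hne, hhd⟩ := hpre
  unfold Spec_is_compress
  match arr, hne with
  | r0 :: rs, _ =>
    simp only [List.headI] at hhd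
    match r0, hhd with
    | b0 :: bs, _ =>
      have hA : is_compress ((b0 :: bs) :: rs) = aRows ((b0 :: bs) :: rs) b0 0 := by
        simp [is_compress]
      rw [hA, aRows_eq]
      show _ = is_compress_alt _
      unfold is_compress_alt
      set flat := (((b0 :: bs) :: rs).flatMap (fun row => row)) with hflat
      by_cases hAll : ∀ r ∈ (b0 :: bs) :: rs, ∀ b ∈ r, b = b0
      · -- all bits equal b0: the set has one element, both sides give the total count
        have hmem : ∀ x ∈ flat, x = b0 := by
          intro x hx
          rw [hflat, List.mem_flatMap] at hx
          obtain ⟨r, hr, hxr⟩ := hx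
          exact hAll r hr x hxr
        have hle : PySem.Set.len (PySem.Set.ofList flat) ≤ 1 :=
          (set_len_le_one flat).mpr (fun x hx y hy => (hmem x hx).trans (hmem y hy).symm)
        rw [if_pos hAll, if_neg (by omega)]
        omega
      · -- some bit differs from b0: A returns 0; the set has ≥ 2 elements so B returns 0
        have hb0 : b0 ∈ flat := by
          rw [hflat]; exact List.mem_flatMap.mpr ⟨b0 :: bs, by simp, by simp⟩
        have hx : ∃ x ∈ flat, x ≠ b0 := by
          by_contra h
          push Not at h
          exact hAll fun r hr b hb => h b (by
            rw [hflat, List.mem_flatMap]; exact ⟨r, hr, hb⟩)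
        obtain ⟨x, hxmem, hxne⟩ := hx
        have hgt : ¬ PySem.Set.len (PySem.Set.ofList flat) ≤ 1 := by
          intro hle
          exact hxne ((set_len_le_one flat).mp hle x hxmem b0 hb0)
        rw [if_neg hAll, if_pos (by omega)]
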